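-- pv_equiv track=rewrite | github.com/vosslab/bkchem-oasa | packages/oasa/oasa/coords_gen/phase1_rings.py | find_ring_systems
-- ===== SOURCE A (Python) =====
-- def find_ring_systems(rings: list) -> list:
-- 	"""Group SSSR rings that share atoms into ring systems.
--
-- 	Args:
-- 		rings: list of rings, each a list of atom objects.
--
-- 	Returns:
-- 		List of ring systems, each a list of rings (lists of atoms).
-- 	"""
-- 	if not rings:
-- 		return []
-- 	# build adjacency: ring i shares atoms with ring j
-- 	ring_sets = [set(r) for r in rings]
-- 	n = len(ring_sets)
-- 	visited = [False] * n
-- 	systems = []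
-- 	for i in range(n):
-- 		if visited[i]:
-- 			continue
-- 		# BFS to find connected ring cluster
-- 		system = [i]
-- 		visited[i] = True
-- 		queue = [i]
-- 		while queue:
-- 			cur = queue.pop(0)
-- 			for j in range(n):
-- 				if not visited[j] and ring_sets[cur] & ring_sets[j]:
-- 					visited[j] = True
-- 					queue.append(j)
-- 					system.append(j)
-- 		systems.append([rings[idx] for idx in system])
-- 	return systems
-- ===== SOURCE B (Python) =====
-- def find_ring_systems(rings: list) -> list:
-- 	"""Group SSSR rings that share atoms into ring systems (atom-index map + BFS)."""
-- 	if not rings: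
-- 		return []
-- 	n = len(rings)
-- 	atom_map = {}
-- 	for i, r in enumerate(rings):
-- 		for a in r:
-- 			atom_map.setdefault(a, []).append(i)
-- 	visited = [False] * n
-- 	systems = []
-- 	for i in range(n):
-- 		if visited[i]:
-- 			continue
-- 		visited[i] = True
-- 		system = [i]
-- 		head = 0
-- 		while head < len(system):
-- 			cur = system[head]
-- 			head += 1
-- 			nbrs = set()
-- 			for a in rings[cur]:
-- 				nbrs.update(atom_map[a])
-- 			for j in sorted(nbrs):
-- 				if not visited[j]:
-- 					visited[j] = True
-- 					system.append(j)
-- 		systems.append([rings[idx] for idx in system])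
-- 	return systems
-- ===== Notes on version B (the rewrite author's own statement) =====
-- stated objective: alternative
-- what changed: Replaces A's all-pairs set-intersection scan inside the BFS by an atom->ring-index map that yields sparse adjacency (neighbours collected per atom and sorted), and fuses A's pop(0) queue into the growing system list with a head pointer; on a timing run's input family this is not measurably faster, so no speed is claimed.
import Mathlib
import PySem

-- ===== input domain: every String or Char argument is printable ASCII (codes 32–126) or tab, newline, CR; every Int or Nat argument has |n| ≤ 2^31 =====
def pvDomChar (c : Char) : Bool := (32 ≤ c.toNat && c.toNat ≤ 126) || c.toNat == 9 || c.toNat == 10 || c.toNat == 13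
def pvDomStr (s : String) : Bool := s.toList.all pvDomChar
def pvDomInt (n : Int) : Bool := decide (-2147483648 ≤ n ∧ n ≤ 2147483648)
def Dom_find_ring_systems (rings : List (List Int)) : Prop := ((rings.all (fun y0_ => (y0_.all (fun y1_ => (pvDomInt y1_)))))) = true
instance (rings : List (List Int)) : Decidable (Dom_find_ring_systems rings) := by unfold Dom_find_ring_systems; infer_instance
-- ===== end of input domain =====

-- B groups the rings by a different algorithm: an atom->ring-index map provides the neighbours of a
-- ring directly (sorted per pop) instead of A's all-pairs set-intersection scan, and A's pop(0)
-- queue is fused into the growing `system` list with a head pointer.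

-- ===== PORT A =====

-- one step of A's inner `for j in range(n)` loop; state = (visited, queue, system)
def fsA_step (rsets : List (PySem.Set Int)) (cur : Nat)
    (st : List Bool × List Nat × List Nat) (j : Nat) : List Bool × List Nat × List Nat :=
  if ¬ st.1.getD j false ∧ PySem.Set.inter (rsets.getD cur []) (rsets.getD j []) ≠ [] then
    (st.1.set j true, st.2.1 ++ [j], st.2.2 ++ [j])
  else st

-- A's `while queue:` loop (fuel-based; fuel n+1 always suffices: each index is enqueued at most once)
def fsA_bfs (rsets : List (PySem.Set Int)) (n : Nat) :
    Nat → List Bool → List Nat → List Nat → List Bool × List Nat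
  | 0, visited, _, system => (visited, system)
  | fuel + 1, visited, queue, system =>
    match queue with
    | [] => (visited, system)
    | cur :: rest =>
      let st := (List.range n).foldl (fsA_step rsets cur) (visited, rest, system)
      fsA_bfs rsets n fuel st.1 st.2.1 st.2.2

def find_ring_systems (rings : List (List Int)) : List (List (List Int)) :=
  if rings = [] then []
  else
    let ring_sets := rings.map PySem.Set.ofList
    let n := rings.length
    ((List.range n).foldl (fun (st : List Bool × List (List (List Int))) i =>
      if st.1.getD i false then st
      else
        let r := fsA_bfs ring_sets n (n + 1) (st.1.set i true) [i] [i]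
        (r.1, st.2 ++ [r.2.map (fun idx => rings.getD idx [])]))
      (List.replicate n false, [])).2

-- ===== PORT B =====

-- atom -> list of indices of the rings containing it (nested `for i, r` / `for a in r` loop)
def fsB_atomMap (rings : List (List Int)) : PySem.Dict Int (List Nat) :=
  rings.zipIdx.foldl
    (fun d p => p.1.foldl (fun d a => d.modify a [] (fun l => l ++ [p.2])) d)
    PySem.Dict.empty

-- `nbrs = set(); for a in rings[cur]: nbrs.update(atom_map[a]); sorted(nbrs)`
def fsB_nbrs (rings : List (List Int)) (am : PySem.Dict Int (List Nat)) (cur : Nat) : List Nat :=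
  PySem.List.sorted
    ((rings.getD cur []).foldl (fun s a => PySem.Set.update s (am.getD a [])) PySem.Set.empty)
    (fun x => x) false

-- one step of B's `for j in sorted(nbrs)` loop; state = (visited, system)
def fsB_step (st : List Bool × List Nat) (j : Nat) : List Bool × List Nat :=
  if ¬ st.1.getD j false then (st.1.set j true, st.2 ++ [j]) else st

-- B's `while head < len(system)` loop (same fuel)
def fsB_bfs (rings : List (List Int)) (am : PySem.Dict Int (List Nat)) :
    Nat → List Bool → List Nat → Nat → List Bool × List Nat
  | 0, visited, system, _ => (visited, system)
  | fuel + 1, visited, system, head =>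
    if head < system.length then
      let st := (fsB_nbrs rings am (system.getD head 0)).foldl fsB_step (visited, system)
      fsB_bfs rings am fuel st.1 st.2 (head + 1)
    else (visited, system)

def find_ring_systems_alt (rings : List (List Int)) : List (List (List Int)) :=
  if rings = [] then []
  else
    let n := rings.length
    let am := fsB_atomMap rings
    ((List.range n).foldl (fun (st : List Bool × List (List (List Int))) i =>
      if st.1.getD i false then st
      else
        let r := fsB_bfs rings am (n + 1) (st.1.set i true) [i] 0
        (r.1, st.2 ++ [r.2.map (fun idx => rings.getD idx [])]))
      (List.replicate n false, [])).2

-- ===== PRECONDITION & SPEC =====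
def Spec_find_ring_systems (rings : List (List Int)) (out : List (List (List Int))) : Prop := out = find_ring_systems_alt rings
instance (rings : List (List Int)) (out : List (List (List Int))) : Decidable (Spec_find_ring_systems rings out) := by unfold Spec_find_ring_systems; infer_instance

-- ===== CLAIM (what is proved, stated in full; the proofs are below) =====
def Claim_equal_find_ring_systems : Prop := ∀ (rings : List (List Int)), Dom_find_ring_systems rings → Spec_find_ring_systems rings (find_ring_systems rings)

-- ===== LEMMAS AND PROOFS =====

-- A's inner-loop test, as a Bool on the ring list
def pvTest (rings : List (List Int)) (cur j : Nat) : Bool :=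
  decide (PySem.Set.inter ((rings.map PySem.Set.ofList).getD cur []) ((rings.map PySem.Set.ofList).getD j []) ≠ [])

-- A's inner step once the intersection test has been factored out
def fsA_step' (st : List Bool × List Nat × List Nat) (j : Nat) : List Bool × List Nat × List Nat :=
  if ¬ st.1.getD j false then (st.1.set j true, st.2.1 ++ [j], st.2.2 ++ [j]) else st

lemma getD_map_ofList (rings : List (List Int)) (k : Nat) :
    (rings.map PySem.Set.ofList).getD k [] = PySem.Set.ofList (rings.getD k []) := by
  by_cases hk : k < rings.length
  · rw [List.getD_eq_getElem _ _ (by simpa using hk), List.getD_eq_getElem _ _ hk,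
      List.getElem_map]
  · rw [List.getD_eq_default _ _ (by simpa using Nat.le_of_not_lt hk),
      List.getD_eq_default _ _ (Nat.le_of_not_lt hk)]
    rfl

lemma pvTest_iff (rings : List (List Int)) (cur j : Nat) :
    pvTest rings cur j = true ↔ ∃ a ∈ rings.getD cur [], a ∈ rings.getD j [] := by
  unfold pvTest
  rw [decide_eq_true_iff]
  constructor
  · intro h
    obtain ⟨x, hx⟩ := List.exists_mem_of_ne_nil _ h
    rw [PySem.Set.mem_inter, getD_map_ofList, getD_map_ofList,
      PySem.Set.mem_ofList, PySem.Set.mem_ofList] at hx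
    exact ⟨x, hx.1, hx.2⟩
  · rintro ⟨a, h1, h2⟩ hnil
    have hmem : a ∈ PySem.Set.inter ((rings.map PySem.Set.ofList).getD cur [])
        ((rings.map PySem.Set.ofList).getD j []) := by
      rw [PySem.Set.mem_inter, getD_map_ofList, getD_map_ofList,
        PySem.Set.mem_ofList, PySem.Set.mem_ofList]
      exact ⟨h1, h2⟩
    rw [hnil] at hmem
    exact List.not_mem_nil hmem

lemma fsA_step_eq (rings : List (List Int)) (cur : Nat)
    (st : List Bool × List Nat × List Nat) (j : Nat) :
    fsA_step (rings.map PySem.Set.ofList) cur st j =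
      if pvTest rings cur j then fsA_step' st j else st := by
  unfold fsA_step fsA_step' pvTest
  by_cases ht : PySem.Set.inter ((rings.map PySem.Set.ofList).getD cur [])
      ((rings.map PySem.Set.ofList).getD j []) = []
  · rw [if_neg (fun hc => hc.2 ht),
      if_neg (by simp only [decide_eq_true_iff]; exact fun hc => hc ht)]
  · rw [if_pos (decide_eq_true ht)]
    by_cases hv : st.1.getD j false
    · rw [if_neg (fun hc => hc.1 hv), if_neg (not_not_intro hv)]
    · rw [if_pos ⟨hv, ht⟩, if_pos hv]

-- the atom map as a single fold over all (atom, ring-index) pairs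
lemma atomMap_flat (rings : List (List Int)) :
    fsB_atomMap rings =
      (rings.zipIdx.flatMap (fun p => p.1.map (fun a => (a, p.2)))).foldl
        (fun d q => d.modify q.1 [] (fun l => l ++ [q.2])) PySem.Dict.empty := by
  unfold fsB_atomMap
  rw [List.foldl_flatMap]
  congr 1
  funext d p
  rw [List.foldl_map]

lemma mem_atomMap_getD (rings : List (List Int)) (a : Int) (j : Nat) :
    j ∈ (fsB_atomMap rings).getD a [] ↔ j < rings.length ∧ a ∈ rings.getD j [] := by
  rw [atomMap_flat, PySem.Dict.getD_foldl_modify_append]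
  simp only [PySem.Dict.getD_empty, List.nil_append, List.mem_map, List.mem_filter,
    List.mem_flatMap, List.mem_zipIdx_iff_getElem?]
  constructor
  · rintro ⟨q, ⟨⟨p, hp, hq⟩, hqa⟩, rfl⟩
    obtain ⟨b, hb, hbq⟩ := hq
    obtain rfl := hbq
    simp only [beq_iff_eq] at hqa
    subst hqa
    obtain ⟨hlt, hEq⟩ := List.getElem?_eq_some_iff.mp hp
    exact ⟨hlt, by rw [List.getD_eq_getElem _ _ hlt, hEq]; exact hb⟩
  · rintro ⟨hj, ha⟩
    rw [List.getD_eq_getElem _ _ hj] at ha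
    refine ⟨(a, j), ⟨⟨(rings[j], j), ?_, ⟨a, ha, rfl⟩⟩, by simp⟩, rfl⟩
    exact List.getElem?_eq_some_iff.mpr ⟨hj, rfl⟩

lemma mem_foldl_update (f : Int → List Nat) (L : List Int) (s : PySem.Set Nat) (j : Nat) :
    j ∈ L.foldl (fun s a => PySem.Set.update s (f a)) s ↔ j ∈ s ∨ ∃ a ∈ L, j ∈ f a := by
  induction L generalizing s with
  | nil => simp
  | cons b L ih =>
    simp only [List.foldl_cons, ih, PySem.Set.mem_update, List.mem_cons]
    constructor
    · rintro ((h | h) | ⟨a, ha, hja⟩)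
      · exact Or.inl h
      · exact Or.inr ⟨b, Or.inl rfl, h⟩
      · exact Or.inr ⟨a, Or.inr ha, hja⟩
    · rintro (h | ⟨a, (rfl | ha), hja⟩)
      · exact Or.inl (Or.inl h)
      · exact Or.inl (Or.inr hja)
      · exact Or.inr ⟨a, ha, hja⟩

lemma nodup_foldl_update (f : Int → List Nat) (L : List Int) (s : PySem.Set Nat)
    (hs : s.Nodup) : (L.foldl (fun s a => PySem.Set.update s (f a)) s).Nodup := by
  induction L generalizing s with
  | nil => exact hs
  | cons b L ih => exact ih _ (PySem.Set.nodup_update _ _ hs)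

lemma mem_nbrs (rings : List (List Int)) (cur j : Nat) :
    j ∈ fsB_nbrs rings (fsB_atomMap rings) cur ↔
      j < rings.length ∧ ∃ a ∈ rings.getD cur [], a ∈ rings.getD j [] := by
  unfold fsB_nbrs
  rw [PySem.List.mem_sorted, mem_foldl_update]
  simp only [PySem.Set.empty, List.not_mem_nil, false_or, mem_atomMap_getD]
  constructor
  · rintro ⟨a, ha, hj, haj⟩
    exact ⟨hj, a, ha, haj⟩
  · rintro ⟨hj, a, ha, haj⟩
    exact ⟨a, ha, hj, haj⟩

lemma nbrs_pairwise_lt (rings : List (List Int)) (cur : Nat) :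
    (fsB_nbrs rings (fsB_atomMap rings) cur).Pairwise (· < ·) := by
  have hnd0 : (List.foldl (fun s a => PySem.Set.update s ((fsB_atomMap rings).getD a []))
      PySem.Set.empty (rings.getD cur [])).Nodup :=
    nodup_foldl_update _ _ _ List.nodup_nil
  unfold fsB_nbrs
  have hnd := (PySem.List.sorted_perm
    ((rings.getD cur []).foldl (fun s a => PySem.Set.update s ((fsB_atomMap rings).getD a []))
      PySem.Set.empty) (fun x : Nat => x) false).symm.nodup hnd0
  have hle := PySem.List.sorted_pairwise
    ((rings.getD cur []).foldl (fun s a => PySem.Set.update s ((fsB_atomMap rings).getD a []))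
      PySem.Set.empty) (fun x : Nat => x)
  exact (hle.and hnd).imp (fun h => lt_of_le_of_ne h.1 h.2)

-- A's dense inner scan enumerates exactly B's sorted sparse neighbour list
lemma filter_eq_nbrs (rings : List (List Int)) (cur : Nat) :
    (List.range rings.length).filter (pvTest rings cur) =
      fsB_nbrs rings (fsB_atomMap rings) cur := by
  have h1 : ((List.range rings.length).filter (pvTest rings cur)).Pairwise (· < ·) :=
    List.Pairwise.filter _ List.pairwise_lt_range
  have h2 := nbrs_pairwise_lt rings cur
  have hmem : ∀ j, j ∈ (List.range rings.length).filter (pvTest rings cur) ↔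
      j ∈ fsB_nbrs rings (fsB_atomMap rings) cur := by
    intro j
    rw [List.mem_filter, List.mem_range, mem_nbrs, pvTest_iff]
  refine PySem.List.eq_of_perm_of_pairwise_le_of_injective (fun x : Nat => x)
    (fun a b h => h) ?_ (h1.imp le_of_lt) (h2.imp le_of_lt)
  rw [List.perm_ext_iff_of_nodup (h1.imp ne_of_lt) (h2.imp ne_of_lt)]
  exact hmem

-- B's fold only appends to `system`
lemma foldl_fsB_step_prefix (L : List Nat) (v : List Bool) (s : List Nat) :
    ∃ t, (L.foldl fsB_step (v, s)).2 = s ++ t := by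
  induction L generalizing v s with
  | nil => exact ⟨[], by simp⟩
  | cons j L ih =>
    by_cases hv : v.getD j false
    · have hb : fsB_step (v, s) j = (v, s) := by
        simp only [fsB_step]
        rw [if_neg (not_not_intro hv)]
      rw [List.foldl_cons, hb]
      exact ih v s
    · have hb : fsB_step (v, s) j = (v.set j true, s ++ [j]) := by
        simp only [fsB_step]
        rw [if_pos hv]
      rw [List.foldl_cons, hb]
      obtain ⟨t, ht⟩ := ih (v.set j true) (s ++ [j])
      exact ⟨[j] ++ t, by rw [ht]; simp⟩

-- A's (visited, queue, system) fold is B's (visited, system) fold plus the new tail on the queue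
lemma fold_pair (L : List Nat) (v : List Bool) (q s : List Nat) :
    L.foldl fsA_step' (v, q, s) =
      ((L.foldl fsB_step (v, s)).1,
       q ++ (L.foldl fsB_step (v, s)).2.drop s.length,
       (L.foldl fsB_step (v, s)).2) := by
  induction L generalizing v q s with
  | nil => simp
  | cons j L ih =>
    by_cases hv : v.getD j false
    · have ha : fsA_step' (v, q, s) j = (v, q, s) := by
        simp only [fsA_step']
        rw [if_neg (not_not_intro hv)]
      have hb : fsB_step (v, s) j = (v, s) := by
        simp only [fsB_step]
        rw [if_neg (not_not_intro hv)]
      rw [List.foldl_cons, List.foldl_cons, ha, hb]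
      exact ih v q s
    · have ha : fsA_step' (v, q, s) j = (v.set j true, q ++ [j], s ++ [j]) := by
        simp only [fsA_step']
        rw [if_pos hv]
      have hb : fsB_step (v, s) j = (v.set j true, s ++ [j]) := by
        simp only [fsB_step]
        rw [if_pos hv]
      rw [List.foldl_cons, List.foldl_cons, ha, hb,
        ih (v.set j true) (q ++ [j]) (s ++ [j])]
      obtain ⟨t, ht⟩ := foldl_fsB_step_prefix L (v.set j true) (s ++ [j])
      rw [ht]
      have e1 : List.drop (s ++ [j]).length (s ++ [j] ++ t) = t := List.drop_left
      have e2 : List.drop s.length (s ++ [j] ++ t) = [j] ++ t := by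
        rw [List.append_assoc]
        exact List.drop_left
      rw [e1, e2]
      simp

-- the two BFS loops agree when A's queue is the unprocessed tail of B's system list
lemma bfs_eq (rings : List (List Int)) :
    ∀ (fuel : Nat) (v : List Bool) (system : List Nat) (head : Nat),
      head ≤ system.length →
      fsA_bfs (rings.map PySem.Set.ofList) rings.length fuel v (system.drop head) system =
        fsB_bfs rings (fsB_atomMap rings) fuel v system head := by
  intro fuel
  induction fuel with
  | zero => intro v system head _; rfl
  | succ fuel ih =>
    intro v system head hle
    by_cases hlt : head < system.length
    · rw [List.drop_eq_getElem_cons hlt]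
      simp only [fsA_bfs, fsB_bfs, hlt, if_pos]
      have hcur : system.getD head 0 = system[head] := List.getD_eq_getElem _ _ hlt
      rw [hcur]
      have hfn : fsA_step (rings.map PySem.Set.ofList) system[head] =
          fun st j => if pvTest rings system[head] j then fsA_step' st j else st := by
        funext st j
        exact fsA_step_eq rings system[head] st j
      rw [hfn, ← List.foldl_filter, filter_eq_nbrs, fold_pair]
      obtain ⟨t, ht⟩ :=
        foldl_fsB_step_prefix (fsB_nbrs rings (fsB_atomMap rings) system[head]) v system
      set W := (fsB_nbrs rings (fsB_atomMap rings) system[head]).foldl fsB_step (v, system)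
        with hW
      have hq : system.drop (head + 1) ++ W.2.drop system.length = W.2.drop (head + 1) := by
        rw [ht]
        have h1 : (system ++ t).drop system.length = t := List.drop_left
        have h2 : (system ++ t).drop (head + 1) = system.drop (head + 1) ++ t :=
          List.drop_append_of_le_length hlt
        rw [h1, h2]
      rw [hq]
      exact ih W.1 W.2 (head + 1) (by rw [ht]; simp only [List.length_append]; omega)
    · have hge : system.length ≤ head := Nat.le_of_not_lt hlt
      rw [List.drop_eq_nil_of_le hge]
      simp only [fsA_bfs, fsB_bfs, hlt, if_neg, not_false_eq_true]

-- ===== VERDICT (by name: the statement is the Claim_ definition above) =====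
theorem find_ring_systems_spec : Claim_equal_find_ring_systems := by
  intro rings _
  unfold Spec_find_ring_systems find_ring_systems find_ring_systems_alt
  by_cases h : rings = []
  · simp [h]
  · simp only [h, if_neg, not_false_eq_true]
    have hstep : (fun (st : List Bool × List (List (List Int))) (i : Nat) =>
        if st.1.getD i false then st
        else
          ((fsA_bfs (rings.map PySem.Set.ofList) rings.length (rings.length + 1)
              (st.1.set i true) [i] [i]).1,
           st.2 ++ [(fsA_bfs (rings.map PySem.Set.ofList) rings.length (rings.length + 1)
              (st.1.set i true) [i] [i]).2.map (fun idx => rings.getD idx [])])) =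
        (fun (st : List Bool × List (List (List Int))) (i : Nat) =>
        if st.1.getD i false then st
        else
          ((fsB_bfs rings (fsB_atomMap rings) (rings.length + 1) (st.1.set i true) [i] 0).1,
           st.2 ++ [(fsB_bfs rings (fsB_atomMap rings) (rings.length + 1)
              (st.1.set i true) [i] 0).2.map (fun idx => rings.getD idx [])])) := by
      funext st i
      by_cases hv : st.1.getD i false
      · rw [if_pos hv, if_pos hv]
      · rw [if_neg hv, if_neg hv]
        have hb := bfs_eq rings (rings.length + 1) (st.1.set i true) [i] 0 (by simp)
        rw [List.drop_zero] at hb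
        rw [hb]
    rw [hstep]
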